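-- pv_equiv track=rewrite | github.com/GillianMiller131/Lesion_Pipeline | GNMPipeline.py | set_registration_target
-- ===== SOURCE A (Python) =====
-- def set_registration_target(file_names, target1, target2):
--
--     """
--     Sets the registration target based on a list of file names.
--
--     This function looks at the file names and sets the registration target to the first file that matches a certain criterion.
--
--     Parameters:
--     file_names (list): A list of file names.
--     target1 (str): Ideal file type for registration. Case sensitive.
--     target2 (str): Back-up file type for registration if first not avaiable. Case sensitive.
--
--     Returns:
--     reg_target (str): The available registration target file type.
--
--     """
--
--     reg_target = None
--     for file_name in file_names:
--         if target1 in file_name: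
--             reg_target = target1
--             break
--     if reg_target is None:
--         for file_name in file_names:
--             if target2 in file_name:
--                 reg_target = target2
--                 break
--     if reg_target is None:
--         raise ValueError(f"No registration target found in {file_names}")
--     return reg_target
-- ===== SOURCE B (Python) =====
-- def set_registration_target(file_names, target1, target2):
--     # Single pass with two flags instead of two sequential priority scans.
--     found1 = False
--     found2 = False
--     for file_name in file_names:
--         if target1 in file_name:
--             found1 = True
--             break
--         if target2 in file_name:
--             found2 = True
--     if found1:
--         return target1
--     if found2:
--         return target2
--     raise ValueError(f"No registration target found in {file_names}")
-- ===== Notes on version B (the rewrite author's own statement) =====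
-- stated objective: alternative
-- what changed: Replaces A's two sequential priority scans over the list with a single pass maintaining two flags (found1 breaks early, found2 is accumulated) and a post-loop decision.
import Mathlib
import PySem

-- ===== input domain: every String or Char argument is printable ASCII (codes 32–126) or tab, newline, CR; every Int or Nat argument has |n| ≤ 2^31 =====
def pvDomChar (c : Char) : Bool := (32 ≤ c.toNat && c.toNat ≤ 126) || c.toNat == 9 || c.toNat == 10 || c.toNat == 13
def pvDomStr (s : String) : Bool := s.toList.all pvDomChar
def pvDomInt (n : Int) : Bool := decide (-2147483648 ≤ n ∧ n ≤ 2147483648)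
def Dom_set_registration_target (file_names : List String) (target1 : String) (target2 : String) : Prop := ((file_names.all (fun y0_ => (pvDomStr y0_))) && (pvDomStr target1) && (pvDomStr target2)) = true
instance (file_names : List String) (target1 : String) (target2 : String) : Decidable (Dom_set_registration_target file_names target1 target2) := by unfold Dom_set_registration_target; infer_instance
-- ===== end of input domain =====

-- B replaces A's two sequential priority scans with a single pass holding two flags; same cost, different decomposition.
-- Where Python A raises ValueError (no file contains either target) B raises too; those inputs are outside Pre_ and the ports return "" there.

-- ===== PORT A =====
-- A's first loop: scan for a file containing target, return `some target` at the first hit (the `break`).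
def pvAScan (target : String) : List String → Option String
  | [] => none
  | f :: rest => if PySem.Str.isIn target f then some target else pvAScan target rest

def set_registration_target (file_names : List String) (target1 : String) (target2 : String) : String :=
  match pvAScan target1 file_names with
  | some r => r
  | none =>
    match pvAScan target2 file_names with
    | some r => r
    | none => ""  -- Python: raise ValueError(...) — excluded by Pre_

-- ===== PORT B =====
-- B's single loop: break as soon as target1 matches, accumulate whether target2 matched.
def pvBScan (target1 target2 : String) : List String → Bool → Bool × Bool
  | [], found2 => (false, found2)
  | f :: rest, found2 =>
    if PySem.Str.isIn target1 f then (true, found2)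
    else pvBScan target1 target2 rest (found2 || PySem.Str.isIn target2 f)

def set_registration_target_alt (file_names : List String) (target1 : String) (target2 : String) : String :=
  let fs := pvBScan target1 target2 file_names false
  if fs.1 then target1
  else if fs.2 then target2
  else ""  -- Python: raise ValueError(...) — excluded by Pre_

-- ===== PRECONDITION & SPEC =====
-- Pre_ excludes exactly the inputs where Python A raises ValueError: no file contains target1 nor target2.
def Pre_set_registration_target (file_names : List String) (target1 : String) (target2 : String) : Prop :=
  (∃ f ∈ file_names, PySem.Str.isIn target1 f = true) ∨ (∃ f ∈ file_names, PySem.Str.isIn target2 f = true)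
instance (file_names : List String) (target1 : String) (target2 : String) : Decidable (Pre_set_registration_target file_names target1 target2) := by unfold Pre_set_registration_target; infer_instance

def pvWitness_set_registration_target : List String × String × String := (["scan_T1w.nii", "scan_T2w.nii"], "T1w", "T2w")

def Spec_set_registration_target (file_names : List String) (target1 : String) (target2 : String) (out : String) : Prop := out = set_registration_target_alt file_names target1 target2
instance (file_names : List String) (target1 : String) (target2 : String) (out : String) : Decidable (Spec_set_registration_target file_names target1 target2 out) := by unfold Spec_set_registration_target; infer_instance

-- ===== CLAIM (what is proved, stated in full; the proofs are below) =====
def Claim_equal_set_registration_target : Prop := ∀ (file_names : List String) (target1 : String) (target2 : String), Dom_set_registration_target file_names target1 target2 → Pre_set_registration_target file_names target1 target2 → Spec_set_registration_target file_names target1 target2 (set_registration_target file_names target1 target2)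

-- ===== LEMMAS AND PROOFS =====

-- A's scan is `some t` iff some file contains t.
theorem pvAScan_eq (t : String) (fs : List String) :
    pvAScan t fs = if fs.any (fun f => PySem.Str.isIn t f) then some t else none := by
  induction fs with
  | nil => rfl
  | cons f rest ih =>
    by_cases h : PySem.Str.isIn t f = true
    · simp only [pvAScan, h, if_true, List.any_cons, Bool.true_or]
    · rw [Bool.not_eq_true] at h
      simp only [pvAScan, h, Bool.false_eq_true, if_false, List.any_cons, Bool.false_or, ih]

-- B's flag found1 records whether some file contains target1.
theorem pvBScan_fst (t1 t2 : String) (fs : List String) (f2 : Bool) :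
    (pvBScan t1 t2 fs f2).1 = fs.any (fun f => PySem.Str.isIn t1 f) := by
  induction fs generalizing f2 with
  | nil => rfl
  | cons f rest ih =>
    by_cases h : PySem.Str.isIn t1 f = true
    · simp only [pvBScan, h, if_true, List.any_cons, Bool.true_or]
    · rw [Bool.not_eq_true] at h
      simp only [pvBScan, h, Bool.false_eq_true, if_false, List.any_cons, Bool.false_or, ih]

-- When no file contains target1 (the loop never breaks), found2 records whether some file contains target2.
theorem pvBScan_snd (t1 t2 : String) (fs : List String) (f2 : Bool)
    (h : fs.any (fun f => PySem.Str.isIn t1 f) = false) :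
    (pvBScan t1 t2 fs f2).2 = (f2 || fs.any (fun f => PySem.Str.isIn t2 f)) := by
  induction fs generalizing f2 with
  | nil => simp [pvBScan]
  | cons f rest ih =>
    simp only [List.any_cons, Bool.or_eq_false_iff] at h
    simp only [pvBScan, h.1, Bool.false_eq_true, if_false, List.any_cons, ih _ h.2, Bool.or_assoc]

theorem set_registration_target_eq (fs : List String) (t1 t2 : String) :
    set_registration_target fs t1 t2 = set_registration_target_alt fs t1 t2 := by
  unfold set_registration_target set_registration_target_alt
  rw [pvAScan_eq, pvAScan_eq]
  cases h1 : fs.any (fun f => PySem.Str.isIn t1 f) with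
  | true => simp only [h1, if_true, pvBScan_fst]
  | false =>
    simp only [h1, Bool.false_eq_true, if_false, pvBScan_fst, pvBScan_snd t1 t2 fs false h1,
      Bool.false_or]
    cases h2 : fs.any (fun f => PySem.Str.isIn t2 f) <;> simp

-- ===== VERDICT (by name: the statement is the Claim_ definition above) =====
theorem set_registration_target_spec : Claim_equal_set_registration_target := by
  intro fs t1 t2 _ _
  exact set_registration_target_eq fs t1 t2
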